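-- pv_equiv track=rewrite | github.com/shrilakshmikakati/E-contract-to-smart-contract | src/core/comparator.py | _are_related_entity_domains
-- ===== SOURCE A (Python) =====
-- def _are_related_entity_domains(type1: str, type2: str) -> bool:
--     domain_groups = [
--         ['PERSON', 'ORG', 'ORGANIZATION', 'PARTY', 'CONTRACT_PARTY', 'VARIABLE', 'GENERAL'],
--         ['MONEY', 'FINANCIAL', 'MONETARY_AMOUNT', 'CURRENCY', 'VARIABLE', 'STATE_VARIABLE'],
--         ['DATE', 'TEMPORAL', 'TIME', 'DURATION', 'VARIABLE', 'STATE_VARIABLE'],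
--         ['FUNCTION', 'SMART_CONTRACT_FUNCTION', 'OBLIGATIONS', 'CONDITIONS'],
--         ['CONTRACT', 'SMART_CONTRACT', 'AGREEMENT', 'CONTRACT_DEFINITION'],
--         ['LOCATION', 'GPE', 'ADDRESS', 'PROPERTY', 'VARIABLE', 'STATE_VARIABLE']
--     ]
--
--     for group in domain_groups:
--         if type1 in group and type2 in group:
--             return True
--     return False
-- ===== SOURCE B (Python) =====
-- # B: precomputed inverted index (entity type -> frozenset of domain-group indices),
-- # related iff the two types' index sets are not disjoint.
-- _GROUP_INDEX = {
--     'PERSON': frozenset({0}),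
--     'ORG': frozenset({0}),
--     'ORGANIZATION': frozenset({0}),
--     'PARTY': frozenset({0}),
--     'CONTRACT_PARTY': frozenset({0}),
--     'VARIABLE': frozenset({0, 1, 2, 5}),
--     'GENERAL': frozenset({0}),
--     'MONEY': frozenset({1}),
--     'FINANCIAL': frozenset({1}),
--     'MONETARY_AMOUNT': frozenset({1}),
--     'CURRENCY': frozenset({1}),
--     'STATE_VARIABLE': frozenset({1, 2, 5}),
--     'DATE': frozenset({2}),
--     'TEMPORAL': frozenset({2}),
--     'TIME': frozenset({2}),
--     'DURATION': frozenset({2}),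
--     'FUNCTION': frozenset({3}),
--     'SMART_CONTRACT_FUNCTION': frozenset({3}),
--     'OBLIGATIONS': frozenset({3}),
--     'CONDITIONS': frozenset({3}),
--     'CONTRACT': frozenset({4}),
--     'SMART_CONTRACT': frozenset({4}),
--     'AGREEMENT': frozenset({4}),
--     'CONTRACT_DEFINITION': frozenset({4}),
--     'LOCATION': frozenset({5}),
--     'GPE': frozenset({5}),
--     'ADDRESS': frozenset({5}),
--     'PROPERTY': frozenset({5}),
-- }
--
-- _EMPTY = frozenset()
--
--
-- def _are_related_entity_domains(type1: str, type2: str) -> bool: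
--     return not _GROUP_INDEX.get(type1, _EMPTY).isdisjoint(_GROUP_INDEX.get(type2, _EMPTY))
-- ===== Notes on version B (the rewrite author's own statement) =====
-- stated objective: alternative
-- what changed: A scans each of the six domain groups testing both types' membership; B uses a precomputed inverted index mapping each entity type to the frozenset of group indices containing it and returns whether the two looked-up index sets are non-disjoint.
import Mathlib
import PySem

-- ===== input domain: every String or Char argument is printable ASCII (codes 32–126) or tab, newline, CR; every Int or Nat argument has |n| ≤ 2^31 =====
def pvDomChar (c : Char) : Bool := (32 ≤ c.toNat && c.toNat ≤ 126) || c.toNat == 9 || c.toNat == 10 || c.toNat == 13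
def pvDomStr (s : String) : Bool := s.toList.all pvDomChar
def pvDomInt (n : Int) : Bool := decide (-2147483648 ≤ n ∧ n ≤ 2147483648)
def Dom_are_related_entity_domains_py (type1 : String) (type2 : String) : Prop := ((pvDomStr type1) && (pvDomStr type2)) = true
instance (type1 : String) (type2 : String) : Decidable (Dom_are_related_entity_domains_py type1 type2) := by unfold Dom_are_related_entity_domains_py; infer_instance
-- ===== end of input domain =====

-- B replaces A's per-group double-membership scan by a precomputed inverted index
-- (entity type → frozenset of group indices) and a set non-disjointness test;
-- objective: alternative decomposition (no speed claim).

-- ===== PORT A =====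
-- the domain_groups table A declares locally
def pvGroups : List (List String) :=
  [["PERSON", "ORG", "ORGANIZATION", "PARTY", "CONTRACT_PARTY", "VARIABLE", "GENERAL"],
   ["MONEY", "FINANCIAL", "MONETARY_AMOUNT", "CURRENCY", "VARIABLE", "STATE_VARIABLE"],
   ["DATE", "TEMPORAL", "TIME", "DURATION", "VARIABLE", "STATE_VARIABLE"],
   ["FUNCTION", "SMART_CONTRACT_FUNCTION", "OBLIGATIONS", "CONDITIONS"],
   ["CONTRACT", "SMART_CONTRACT", "AGREEMENT", "CONTRACT_DEFINITION"],
   ["LOCATION", "GPE", "ADDRESS", "PROPERTY", "VARIABLE", "STATE_VARIABLE"]]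

-- for group in domain_groups: if type1 in group and type2 in group: return True; return False
def are_related_entity_domains_py (type1 : String) (type2 : String) : Bool :=
  pvGroups.any (fun group => group.contains type1 && group.contains type2)

-- ===== PORT B =====
-- B's module-level dict literal _GROUP_INDEX (each frozenset as a PySem.Set Int)
def pvGroupIndex : PySem.Dict String (PySem.Set Int) :=
  PySem.Dict.ofList
    [("PERSON", [0]), ("ORG", [0]), ("ORGANIZATION", [0]), ("PARTY", [0]),
     ("CONTRACT_PARTY", [0]), ("VARIABLE", [0, 1, 2, 5]), ("GENERAL", [0]),
     ("MONEY", [1]), ("FINANCIAL", [1]), ("MONETARY_AMOUNT", [1]), ("CURRENCY", [1]),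
     ("STATE_VARIABLE", [1, 2, 5]),
     ("DATE", [2]), ("TEMPORAL", [2]), ("TIME", [2]), ("DURATION", [2]),
     ("FUNCTION", [3]), ("SMART_CONTRACT_FUNCTION", [3]), ("OBLIGATIONS", [3]),
     ("CONDITIONS", [3]),
     ("CONTRACT", [4]), ("SMART_CONTRACT", [4]), ("AGREEMENT", [4]),
     ("CONTRACT_DEFINITION", [4]),
     ("LOCATION", [5]), ("GPE", [5]), ("ADDRESS", [5]), ("PROPERTY", [5])]

-- return not _GROUP_INDEX.get(type1, _EMPTY).isdisjoint(_GROUP_INDEX.get(type2, _EMPTY))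
def are_related_entity_domains_py_alt (type1 : String) (type2 : String) : Bool :=
  !(PySem.Set.isdisjoint (PySem.Dict.getD pvGroupIndex type1 PySem.Set.empty)
      (PySem.Dict.getD pvGroupIndex type2 PySem.Set.empty))

-- ===== PRECONDITION & SPEC =====
def Spec_are_related_entity_domains_py (type1 : String) (type2 : String) (out : Bool) : Prop := out = are_related_entity_domains_py_alt type1 type2
instance (type1 : String) (type2 : String) (out : Bool) : Decidable (Spec_are_related_entity_domains_py type1 type2 out) := by unfold Spec_are_related_entity_domains_py; infer_instance

-- ===== CLAIM (what is proved, stated in full; the proofs are below) =====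
def Claim_equal_are_related_entity_domains_py : Prop := ∀ (type1 : String) (type2 : String), Dom_are_related_entity_domains_py type1 type2 → Spec_are_related_entity_domains_py type1 type2 (are_related_entity_domains_py type1 type2)

-- ===== LEMMAS AND PROOFS =====

-- the ofList build of the literal index, evaluated (all 28 keys are distinct)
lemma pv_index_mk : pvGroupIndex = PySem.Dict.mk
    [("PERSON", [0]), ("ORG", [0]), ("ORGANIZATION", [0]), ("PARTY", [0]), ("CONTRACT_PARTY", [0]),
     ("VARIABLE", [0, 1, 2, 5]), ("GENERAL", [0]), ("MONEY", [1]), ("FINANCIAL", [1]),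
     ("MONETARY_AMOUNT", [1]), ("CURRENCY", [1]), ("STATE_VARIABLE", [1, 2, 5]), ("DATE", [2]),
     ("TEMPORAL", [2]), ("TIME", [2]), ("DURATION", [2]), ("FUNCTION", [3]),
     ("SMART_CONTRACT_FUNCTION", [3]), ("OBLIGATIONS", [3]), ("CONDITIONS", [3]), ("CONTRACT", [4]),
     ("SMART_CONTRACT", [4]), ("AGREEMENT", [4]), ("CONTRACT_DEFINITION", [4]), ("LOCATION", [5]),
     ("GPE", [5]), ("ADDRESS", [5]), ("PROPERTY", [5])] := by decide

-- the 28 entity types that key B's index (proof-side helper)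
def pvKeys : List String :=
  ["PERSON", "ORG", "ORGANIZATION", "PARTY", "CONTRACT_PARTY", "VARIABLE", "GENERAL",
   "MONEY", "FINANCIAL", "MONETARY_AMOUNT", "CURRENCY", "STATE_VARIABLE",
   "DATE", "TEMPORAL", "TIME", "DURATION",
   "FUNCTION", "SMART_CONTRACT_FUNCTION", "OBLIGATIONS", "CONDITIONS",
   "CONTRACT", "SMART_CONTRACT", "AGREEMENT", "CONTRACT_DEFINITION",
   "LOCATION", "GPE", "ADDRESS", "PROPERTY"]

-- every string in a group is one of the 28 keys
lemma pv_groups_sub (g : List String) (hg : g ∈ pvGroups) (t : String) (ht : t ∈ g) :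
    t ∈ pvKeys := by
  fin_cases hg <;> fin_cases ht <;> decide

-- lookup of an unknown type is the empty set
lemma pv_lookup_unknown (t : String) (h : t ∉ pvKeys) :
    PySem.Dict.getD pvGroupIndex t PySem.Set.empty = PySem.Set.empty := by
  simp only [pvKeys, List.mem_cons, not_or] at h
  obtain ⟨h1, h2, h3, h4, h5, h6, h7, h8, h9, h10, h11, h12, h13, h14, h15, h16, h17,
    h18, h19, h20, h21, h22, h23, h24, h25, h26, h27, h28, -⟩ := h
  simp [pv_index_mk, PySem.Dict.getD, PySem.Dict.get?,
    Ne.symm h1, Ne.symm h2, Ne.symm h3, Ne.symm h4, Ne.symm h5, Ne.symm h6, Ne.symm h7,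
    Ne.symm h8, Ne.symm h9, Ne.symm h10, Ne.symm h11, Ne.symm h12, Ne.symm h13,
    Ne.symm h14, Ne.symm h15, Ne.symm h16, Ne.symm h17, Ne.symm h18, Ne.symm h19,
    Ne.symm h20, Ne.symm h21, Ne.symm h22, Ne.symm h23, Ne.symm h24, Ne.symm h25,
    Ne.symm h26, Ne.symm h27, Ne.symm h28]

-- B's index lookup equals the indices of the groups containing t, read off A's table
lemma pv_lookup_eq (t : String) :
    PySem.Dict.getD pvGroupIndex t PySem.Set.empty
    = ((PySem.List.enumerate pvGroups).filter (fun p => decide (t ∈ p.2))).map (·.1) := by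
  by_cases h : t ∈ pvKeys
  · simp only [pvKeys, List.mem_cons, List.not_mem_nil, or_false] at h
    rcases h with rfl | rfl | rfl | rfl | rfl | rfl | rfl | rfl | rfl | rfl | rfl | rfl |
      rfl | rfl | rfl | rfl | rfl | rfl | rfl | rfl | rfl | rfl | rfl | rfl | rfl | rfl |
      rfl | rfl <;> decide
  · rw [pv_lookup_unknown t h, List.filter_eq_nil_iff.mpr, List.map_nil]
    · rfl
    · intro p hp hmem
      rw [decide_eq_true_eq] at hmem
      refine h (pv_groups_sub p.2 ?_ t hmem)
      rw [← PySem.List.map_snd_enumerate pvGroups 0]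
      exact List.mem_map_of_mem hp

-- characterisation of B's index lookup: i is an index of a group containing t
lemma pv_mem_lookup (t : String) (i : Int) :
    i ∈ PySem.Dict.getD pvGroupIndex t PySem.Set.empty
    ↔ ∃ p ∈ PySem.List.enumerate pvGroups, p.1 = i ∧ t ∈ p.2 := by
  rw [pv_lookup_eq]
  simp only [List.mem_map, List.mem_filter, decide_eq_true_eq]
  constructor
  · rintro ⟨p, ⟨hp, hm⟩, hi⟩
    exact ⟨p, hp, hi, hm⟩
  · rintro ⟨p, hp, hi, hm⟩
    exact ⟨p, ⟨hp, hm⟩, hi⟩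

-- ===== VERDICT (by name: the statement is the Claim_ definition above) =====
theorem are_related_entity_domains_py_spec : Claim_equal_are_related_entity_domains_py := by
  intro t1 t2 _
  unfold Spec_are_related_entity_domains_py
  rw [Bool.eq_iff_iff]
  unfold are_related_entity_domains_py are_related_entity_domains_py_alt
  simp only [List.any_eq_true, Bool.and_eq_true, List.contains_iff_mem,
    PySem.Set.isdisjoint, Bool.not_not, PySem.Set.contains_eq_listContains]
  constructor
  · rintro ⟨g, hg, h1, h2⟩
    have hmap : g ∈ (PySem.List.enumerate pvGroups).map (·.2) := by
      rw [PySem.List.map_snd_enumerate]; exact hg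
    obtain ⟨p, hp, rfl⟩ := List.mem_map.mp hmap
    exact ⟨p.1, (pv_mem_lookup t1 p.1).mpr ⟨p, hp, rfl, h1⟩,
      (pv_mem_lookup t2 p.1).mpr ⟨p, hp, rfl, h2⟩⟩
  · rintro ⟨i, hi1, hi2⟩
    obtain ⟨p, hp, hpi, hp1⟩ := (pv_mem_lookup t1 i).mp hi1
    obtain ⟨q, hq, hqi, hq2⟩ := (pv_mem_lookup t2 i).mp hi2
    have hnd : ((PySem.List.enumerate pvGroups).map (·.1)).Nodup := by
      rw [PySem.List.map_fst_enumerate]; exact PySem.List.nodup_pyRange_one _ _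
    have hpq : p = q := List.inj_on_of_nodup_map hnd hp hq (by rw [hpi, hqi])
    subst hpq
    refine ⟨p.2, ?_, hp1, hq2⟩
    rw [← PySem.List.map_snd_enumerate pvGroups 0]
    exact List.mem_map_of_mem hp
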